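-- pv_equiv track=rewrite | github.com/zwadhams/AutoVulnDiscovery | Assignment2/fuzz1.py | escape_dots
-- ===== SOURCE A (Python) =====
-- def escape_dots(body):
--     lines = body.split("\n")
--     escaped_lines = []
--     for line in lines:
--         if line.startswith("."):
--             escaped_lines.append("." + line)
--         else:
--             escaped_lines.append(line)
--     return "\n".join(escaped_lines)
-- ===== SOURCE B (Python) =====
-- def escape_dots(body):
--     out = []
--     at_line_start = True
--     for ch in body:
--         if at_line_start and ch == ".":
--             out.append(".")
--         out.append(ch)
--         at_line_start = ch == "\n"
--     return "".join(out)
-- ===== Notes on version B (the rewrite author's own statement) =====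
-- stated objective: simpler
-- what changed: Replaced split-into-lines / per-line startswith loop / join with a single left-to-right character scan that carries an at-line-start flag and doubles a dot seen at a line start; no intermediate list of lines is built.
import Mathlib
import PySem

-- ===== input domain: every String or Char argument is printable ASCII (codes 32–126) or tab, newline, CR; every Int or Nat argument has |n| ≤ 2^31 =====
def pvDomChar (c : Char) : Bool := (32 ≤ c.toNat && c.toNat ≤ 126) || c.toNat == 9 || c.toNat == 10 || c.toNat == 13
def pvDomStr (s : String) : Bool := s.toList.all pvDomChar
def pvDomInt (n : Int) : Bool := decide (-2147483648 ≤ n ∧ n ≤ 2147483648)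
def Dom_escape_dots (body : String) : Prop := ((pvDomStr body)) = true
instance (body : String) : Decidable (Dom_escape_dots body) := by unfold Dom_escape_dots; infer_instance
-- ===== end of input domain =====

-- B replaces A's split/loop/join over lines by a single character scan with an
-- at-line-start flag (same output, same O(n) cost; objective: simpler).

-- ===== PORT A =====
-- per-line body of A's loop: "." + line if line.startswith(".") else line
def escapeLine (line : List Char) : List Char :=
  if PySem.Chars.startswith line ['.'] then '.' :: line else line

-- literal port of A (string ops at the Chars level, exact on the domain):
-- lines = body.split("\n"); loop appending escapeLine; "\n".join(...)
def escape_dots (body : String) : String :=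
  let lines := PySem.Chars.splitOn body.toList ['\n']
  let escaped_lines := lines.foldl (fun acc line => acc ++ [escapeLine line]) []
  String.ofList (PySem.Chars.join ['\n'] escaped_lines)

-- ===== PORT B =====
-- the scan of Source B: emit an extra '.' when a '.' is seen at a line start;
-- the flag after a char is (char == '\n')
def altGo : List Char → Bool → List Char
  | [], _ => []
  | c :: cs, atStart =>
      (if atStart && c == '.' then ['.', c] else [c]) ++ altGo cs (c == '\n')

def escape_dots_alt (body : String) : String :=
  String.ofList (altGo body.toList true)

-- ===== PRECONDITION & SPEC =====
def Spec_escape_dots (body : String) (out : String) : Prop := out = escape_dots_alt body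
instance (body : String) (out : String) : Decidable (Spec_escape_dots body out) := by unfold Spec_escape_dots; infer_instance

-- ===== CLAIM (what is proved, stated in full; the proofs are below) =====
def Claim_equal_escape_dots : Prop := ∀ (body : String), Dom_escape_dots body → Spec_escape_dots body (escape_dots body)

-- ===== LEMMAS AND PROOFS =====

-- functional model of split on a single '\n': (head line, remaining lines)
def split1p : List Char → List Char × List (List Char)
  | [] => ([], [])
  | c :: cs =>
      let p := split1p cs
      if c = '\n' then ([], p.1 :: p.2) else (c :: p.1, p.2)

-- tail of a '\n'-join: each further line preceded by '\n'
def joinTail (ls : List (List Char)) : List Char := ls.flatMap (fun l => '\n' :: l)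

theorem go_newline : ∀ (l : List Char) (fuel : Nat) (cur : List Char) (acc : List (List Char)),
    l.length < fuel →
    PySem.Chars.splitOn.go ['\n'] fuel l cur acc
      = acc.reverse ++ (cur.reverse ++ (split1p l).1) :: (split1p l).2 := by
  intro l
  induction l with
  | nil =>
      intro fuel cur acc h
      cases fuel with
      | zero => omega
      | succ f => simp [PySem.Chars.splitOn.go, split1p]
  | cons c cs ih =>
      intro fuel cur acc h
      cases fuel with
      | zero => omega
      | succ f =>
        by_cases hc : c = '\n'
        · subst hc
          have hred : PySem.Chars.splitOn.go ['\n'] (f+1) ('\n'::cs) cur acc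
              = PySem.Chars.splitOn.go ['\n'] f cs [] (cur.reverse :: acc) := by
            rw [PySem.Chars.splitOn.go]; simp [List.drop]
          rw [hred, ih f [] (cur.reverse :: acc) (by simpa using Nat.lt_of_succ_lt_succ h)]
          simp [split1p]
        · rw [PySem.Chars.splitOn.go]
          have hp : (['\n'].isPrefixOf (c :: cs)) = false := by
            simp only [List.isPrefixOf, Bool.and_eq_false_iff, beq_eq_false_iff_ne, ne_eq]
            exact Or.inl fun hh => hc hh.symm
          rw [if_neg (by simp [hp])]
          rw [ih f (c :: cur) acc (by simpa using Nat.lt_of_succ_lt_succ h)]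
          simp [split1p, hc]

theorem splitOn_newline (cs : List Char) :
    PySem.Chars.splitOn cs ['\n'] = (split1p cs).1 :: (split1p cs).2 := by
  unfold PySem.Chars.splitOn
  rw [go_newline cs (cs.length + 1) [] [] (by omega)]
  simp

theorem foldl_append_map {α β : Type} (f : α → β) :
    ∀ (l : List α) (acc : List β),
    l.foldl (fun acc x => acc ++ [f x]) acc = acc ++ l.map f := by
  intro l
  induction l with
  | nil => simp
  | cons x xs ih => intro acc; simp [List.foldl, ih, List.map]

theorem join_cons (x : List Char) (xs : List (List Char)) :
    PySem.Chars.join ['\n'] (x :: xs) = x ++ joinTail xs := by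
  induction xs generalizing x with
  | nil => simp [PySem.Chars.join, joinTail, List.intercalate]
  | cons y ys ih =>
      have h1 : PySem.Chars.join ['\n'] (x :: y :: ys)
          = x ++ '\n' :: PySem.Chars.join ['\n'] (y :: ys) := by
        simp [PySem.Chars.join, List.intercalate, List.intersperse]
      rw [h1, ih]
      simp [joinTail]

theorem altGo_split1p : ∀ (cs : List Char),
    altGo cs true = escapeLine (split1p cs).1 ++ joinTail ((split1p cs).2.map escapeLine)
    ∧ altGo cs false = (split1p cs).1 ++ joinTail ((split1p cs).2.map escapeLine) := by
  intro cs
  induction cs with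
  | nil => simp [altGo, split1p, escapeLine, joinTail, PySem.Chars.startswith]
  | cons c cs ih =>
      obtain ⟨ihT, ihF⟩ := ih
      by_cases hn : c = '\n'
      · subst hn
        constructor <;>
        · simp only [altGo, split1p]
          simp [joinTail, escapeLine, PySem.Chars.startswith, ihT]
      · by_cases hd : c = '.'
        · subst hd
          refine ⟨?_, ?_⟩
          · simp only [altGo, split1p]
            simp [ihF, escapeLine, PySem.Chars.startswith]
          · simp only [altGo, split1p]
            simp [ihF, escapeLine, PySem.Chars.startswith]
        · have hb : (c == '\n') = false := by simp [hn]
          have hd' : ¬'.' = c := fun hh => hd hh.symm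
          refine ⟨?_, ?_⟩ <;>
          · simp only [altGo, split1p]
            simp [hb, hn, hd, hd', ihF, escapeLine, PySem.Chars.startswith, List.isPrefixOf]

-- ===== VERDICT (by name: the statement is the Claim_ definition above) =====
theorem escape_dots_spec : Claim_equal_escape_dots := by
  intro body _
  unfold Spec_escape_dots
  simp only [escape_dots, escape_dots_alt, splitOn_newline, foldl_append_map,
    List.nil_append, List.map_cons, join_cons]
  rw [(altGo_split1p body.toList).1]
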